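-- pv_equiv track=rewrite | github.com/FightWithLife/agent-skills-hook | agents/skills/kingstvis-socket/scripts/kingstvis_socket_client.py | normalize_channels
-- ===== SOURCE A (Python) =====
-- def normalize_channels(values: list[str] | None) -> list[str]:
--     if not values:
--         return []
--     channels: list[str] = []
--     for value in values:
--         for item in value.replace(",", " ").split():
--             if item:
--                 channels.append(item)
--     return channels
-- ===== SOURCE B (Python) =====
-- def normalize_channels(values: list[str] | None) -> list[str]:
--     if not values:
--         return []
--     channels: list[str] = []
--     for value in values:
--         token: list[str] = []
--         for ch in value:
--             if ch == "," or ch.isspace():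
--                 if token:
--                     channels.append("".join(token))
--                     token = []
--             else:
--                 token.append(ch)
--         if token:
--             channels.append("".join(token))
--     return channels
-- ===== Notes on version B (the rewrite author's own statement) =====
-- stated objective: alternative
-- what changed: Replaces A's per-string replace-comma-then-split pipeline (which builds an intermediate replaced string and a split list, then filters/appends) with an explicit single-pass character scanner that maintains a current-token accumulator and emits a token at each comma/whitespace boundary, never materialising intermediate strings or lists.
import Mathlib
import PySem

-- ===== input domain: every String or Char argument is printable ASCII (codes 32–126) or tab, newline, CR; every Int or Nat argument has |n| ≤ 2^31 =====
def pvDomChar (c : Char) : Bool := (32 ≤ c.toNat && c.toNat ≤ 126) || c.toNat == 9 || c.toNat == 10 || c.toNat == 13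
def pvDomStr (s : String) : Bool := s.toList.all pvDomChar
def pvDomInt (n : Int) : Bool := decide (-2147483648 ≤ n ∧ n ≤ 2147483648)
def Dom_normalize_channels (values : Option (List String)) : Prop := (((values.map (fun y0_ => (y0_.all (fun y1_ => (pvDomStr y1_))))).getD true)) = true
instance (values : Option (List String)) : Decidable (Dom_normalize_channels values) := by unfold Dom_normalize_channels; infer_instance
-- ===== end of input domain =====

-- B replaces A's per-string replace-then-split pipeline by an explicit one-pass character scanner with a current-token accumulator (objective: alternative; same cost).

-- ===== PORT A =====
def normalize_channels (values : Option (List String)) : List String :=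
  match values with
  | none => []
  | some vs =>
    if vs = [] then []
    else
      vs.foldl (fun channels value =>
        (PySem.Str.split₀ (PySem.Str.replace value "," " ")).foldl
          (fun channels item => if item ≠ "" then channels ++ [item] else channels)
          channels) []

-- ===== PORT B =====
def normalize_channels_alt (values : Option (List String)) : List String :=
  match values with
  | none => []
  | some vs =>
    if vs = [] then []
    else
      vs.foldl (fun channels value =>
        let p := value.toList.foldl
          (fun (st : List String × List Char) ch =>
            if ch = ',' ∨ PySem.Chars.isspace ch then
              (if st.2 ≠ [] then (st.1 ++ [String.ofList st.2], ([] : List Char)) else st)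
            else (st.1, st.2 ++ [ch]))
          (channels, [])
        if p.2 ≠ [] then p.1 ++ [String.ofList p.2] else p.1) []

-- ===== PRECONDITION & SPEC =====
def Spec_normalize_channels (values : Option (List String)) (out : List String) : Prop := out = normalize_channels_alt values
instance (values : Option (List String)) (out : List String) : Decidable (Spec_normalize_channels values out) := by unfold Spec_normalize_channels; infer_instance

-- ===== CLAIM (what is proved, stated in full; the proofs are below) =====
def Claim_equal_normalize_channels : Prop := ∀ (values : Option (List String)), Dom_normalize_channels values → Spec_normalize_channels values (normalize_channels values)

-- ===== LEMMAS AND PROOFS =====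

/-- comma → space on a single character -/
def subComma (c : Char) : Char := if c = ',' then ' ' else c

/-- reference word splitter: `pre` is the word being accumulated (in order). -/
def mywords : List Char → List Char → List (List Char)
  | pre, [] => if pre = [] then [] else [pre]
  | pre, c :: rest =>
    if PySem.Chars.isspace c then
      (if pre = [] then mywords [] rest else pre :: mywords [] rest)
    else mywords (pre ++ [c]) rest

theorem split₀go_eq (s : List Char) : ∀ (cur : List Char) (acc : List (List Char)),
    PySem.Chars.split₀.go s cur acc = acc.reverse ++ mywords cur.reverse s := by
  induction s with
  | nil =>
    intro cur acc
    simp only [PySem.Chars.split₀.go, mywords, List.isEmpty_iff]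
    by_cases h : cur = [] <;> simp [h]
  | cons c rest ih =>
    intro cur acc
    simp only [PySem.Chars.split₀.go, mywords, List.isEmpty_iff]
    by_cases hs : PySem.Chars.isspace c = true
    · by_cases h : cur = [] <;> simp [hs, h, ih]
    · simp [hs, ih]

theorem split₀_eq_mywords (s : List Char) : PySem.Chars.split₀ s = mywords [] s := by
  simpa using split₀go_eq s [] []

theorem mywords_ne_nil (s : List Char) : ∀ (pre x : List Char), x ∈ mywords pre s → x ≠ [] := by
  induction s with
  | nil =>
    intro pre x hx
    by_cases h : pre = [] <;> simp_all [mywords]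
  | cons c rest ih =>
    intro pre x hx
    simp only [mywords] at hx
    split_ifs at hx with hs hp
    · exact ih [] x hx
    · rcases List.mem_cons.mp hx with h | h
      · subst h; exact hp
      · exact ih [] x h
    · exact ih (pre ++ [c]) x hx

theorem replaceGo_comma (l : List Char) : ∀ (fuel : Nat) (acc : List Char), l.length ≤ fuel →
    PySem.Chars.replace.go [','] [' '] fuel l acc = acc.reverse ++ l.map subComma := by
  induction l with
  | nil =>
    intro fuel acc _
    cases fuel <;> simp [PySem.Chars.replace.go]
  | cons c t ih =>
    intro fuel acc hf
    cases fuel with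
    | zero => simp at hf
    | succ f =>
      simp only [PySem.Chars.replace.go]
      by_cases hc : c = ','
      · subst hc
        have hp : [','].isPrefixOf (',' :: t) = true := by simp [List.isPrefixOf]
        simp [hp, ih f (' ' :: acc) (Nat.le_of_succ_le_succ hf), subComma]
      · have hp : [','].isPrefixOf (c :: t) = false := by
          simp [List.isPrefixOf]; exact fun h => hc h.symm
        simp [hp, ih f _ (Nat.le_of_succ_le_succ hf), subComma, hc]

theorem replace_comma (s : List Char) :
    PySem.Chars.replace s [','] [' '] = s.map subComma := by
  simpa [PySem.Chars.replace] using replaceGo_comma s s.length [] (le_refl _)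

theorem str_split_replace (v : String) :
    PySem.Str.split₀ (PySem.Str.replace v "," " ") =
      List.map String.ofList (PySem.Chars.split₀ (v.toList.map subComma)) := by
  have h1 : (","  : String).toList = [','] := by decide
  have h2 : (" " : String).toList = [' '] := by decide
  simp [PySem.Str.split₀, PySem.Str.replace, h1, h2, replace_comma]

theorem inner_fold_eq (L : List String) (acc : List String) (h : ∀ x ∈ L, x ≠ "") :
    L.foldl (fun channels item => if item ≠ "" then channels ++ [item] else channels) acc
      = acc ++ L := by
  induction L generalizing acc with
  | nil => simp
  | cons x L' ih =>
    have hx : x ≠ "" := h x (List.mem_cons_self)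
    simp only [List.foldl_cons, if_pos hx]
    rw [ih _ (fun y hy => h y (List.mem_cons_of_mem _ hy))]
    simp

theorem split_items_ne (v : String) : ∀ x ∈ PySem.Str.split₀ v, x ≠ "" := by
  intro x hx
  simp only [PySem.Str.split₀, List.mem_map] at hx
  obtain ⟨cs, hcs, rfl⟩ := hx
  have : cs ≠ [] := mywords_ne_nil v.toList [] cs (by rwa [← split₀_eq_mywords])
  intro h
  apply this
  have := congrArg String.toList h
  simpa using this

theorem isspace_subComma (c : Char) :
    PySem.Chars.isspace (subComma c) = (c = ',' || PySem.Chars.isspace c) := by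
  by_cases hc : c = ','
  · subst hc; simp [subComma]; decide
  · simp [subComma, hc]

/-- B's inner scanner equals A's word decomposition of the comma-substituted string. -/
theorem scan_eq (s : List Char) : ∀ (pre : List Char) (channels : List String),
    (let p := s.foldl
        (fun (st : List String × List Char) ch =>
          if ch = ',' ∨ PySem.Chars.isspace ch then
            (if st.2 ≠ [] then (st.1 ++ [String.ofList st.2], ([] : List Char)) else st)
          else (st.1, st.2 ++ [ch]))
        (channels, pre);
      if p.2 ≠ [] then p.1 ++ [String.ofList p.2] else p.1)
      = channels ++ (mywords pre (s.map subComma)).map String.ofList := by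
  induction s with
  | nil =>
    intro pre channels
    by_cases h : pre = [] <;> simp [mywords, h]
  | cons c rest ih =>
    intro pre channels
    by_cases hd : c = ',' ∨ PySem.Chars.isspace c = true
    · have hs : PySem.Chars.isspace (subComma c) = true := by
        rw [isspace_subComma]
        rcases hd with h | h <;> simp [h]
      by_cases h : pre = []
      · simp only [List.map_cons, mywords, hs, h, if_pos]
        simpa [hd, h] using ih [] channels
      · simp only [List.map_cons, mywords, hs, h]
        have := ih [] (channels ++ [String.ofList pre])
        simp only [List.foldl_cons, if_pos hd, if_pos (show pre ≠ [] from h)] at *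
        rw [this]; simp
    · have hc : c ≠ ',' := fun h => hd (Or.inl h)
      have hs : PySem.Chars.isspace c = false := by
        cases hss : PySem.Chars.isspace c
        · rfl
        · exact absurd (Or.inr hss) hd
      have hsub : subComma c = c := by simp [subComma, hc]
      simpa [mywords, hs, hsub, hc] using ih (pre ++ [c]) channels

-- ===== VERDICT (by name: the statement is the Claim_ definition above) =====
set_option maxHeartbeats 1000000 in
theorem normalize_channels_spec : Claim_equal_normalize_channels := by
  intro values _
  unfold Spec_normalize_channels normalize_channels normalize_channels_alt
  cases values with
  | none => rfl
  | some vs =>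
    by_cases h : vs = []
    · simp [h]
    · simp only [h, if_false]
      apply List.foldl_ext
      intro acc v hv
      rw [inner_fold_eq _ acc (split_items_ne _), str_split_replace, split₀_eq_mywords]
      exact (scan_eq v.toList [] acc).symm
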